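-- pv_equiv track=rewrite | github.com/HoffmanThomas/unsupervised-learners | RL_Learner/mockup_qtab.py | incCounter
-- ===== SOURCE A (Python) =====
-- def incCounter(lst,ele,inc):
-- 	for key,val in lst.items():
-- 		if key == ele:
-- 			if inc == True:
-- 				lst[key]+=1
-- 			return lst ,lst[key]
-- 	if inc == True:
-- 		lst[ele]=0
-- 	return lst,0
-- ===== SOURCE B (Python) =====
-- def incCounter(lst, ele, inc):
--     bump = 1 if inc else 0
--     if ele in lst:
--         out = {k: v + bump * (k == ele) for k, v in lst.items()}
--         return out, out[ele]
--     out = dict(lst)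
--     if inc:
--         out[ele] = 0
--     return out, 0
-- ===== Notes on version B (the rewrite author's own statement) =====
-- stated objective: alternative
-- what changed: B replaces A's item scan with early return and in-place point mutation by a membership test followed by rebuilding the whole mapping with a dict comprehension that bumps the matching entry (returning a fresh dict).
import Mathlib
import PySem

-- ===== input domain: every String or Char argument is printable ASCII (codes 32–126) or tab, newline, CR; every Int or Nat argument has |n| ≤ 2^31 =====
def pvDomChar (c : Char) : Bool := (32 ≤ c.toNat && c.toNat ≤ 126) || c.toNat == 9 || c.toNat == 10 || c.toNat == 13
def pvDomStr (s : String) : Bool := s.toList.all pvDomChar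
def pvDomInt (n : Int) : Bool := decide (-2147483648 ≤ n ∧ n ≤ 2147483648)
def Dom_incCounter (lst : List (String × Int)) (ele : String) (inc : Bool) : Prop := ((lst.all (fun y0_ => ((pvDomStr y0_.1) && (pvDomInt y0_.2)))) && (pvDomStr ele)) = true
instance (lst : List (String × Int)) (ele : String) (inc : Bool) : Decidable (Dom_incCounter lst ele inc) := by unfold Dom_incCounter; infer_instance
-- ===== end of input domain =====

-- B tests membership once and rebuilds the whole mapping by a dict comprehension (with the
-- matching entry bumped), instead of A's item scan with early return and in-place mutation;
-- A mutates its dict argument, B returns a fresh dict — the equivalence is about the returned pair.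

-- ===== PORT A =====
-- the 'for key,val in lst.items():' loop with its early return; the found branch mutates/reads the whole dict
def incCounterGo (lst : List (String × Int)) (ele : String) (inc : Bool) :
    List (String × Int) → (List (String × Int)) × Int
  | [] =>
      -- loop fell through: 'if inc == True: lst[ele]=0; return lst,0'
      if inc then (((PySem.Dict.mk lst).insert ele 0).items, 0) else (lst, 0)
  | (key, _val) :: rest =>
      if key == ele then
        -- 'if inc == True: lst[key]+=1; return lst, lst[key]'  (key is present, so lst[key] reads getD)
        let d := if inc then (PySem.Dict.mk lst).modify key 0 (· + 1) else PySem.Dict.mk lst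
        (d.items, d.getD key 0)
      else incCounterGo lst ele inc rest

def incCounter (lst : List (String × Int)) (ele : String) (inc : Bool) : (List (String × Int)) × Int :=
  incCounterGo lst ele inc lst

-- ===== PORT B =====
def incCounter_alt (lst : List (String × Int)) (ele : String) (inc : Bool) : (List (String × Int)) × Int :=
  let bump : Int := if inc then 1 else 0
  let d := PySem.Dict.mk lst
  if d.contains ele then
    -- '{k: v + bump * (k == ele) for k, v in lst.items()}'; 'out[ele]' reads a key that is present
    let out := PySem.Dict.mk (d.items.map (fun kv => (kv.1, kv.2 + bump * (if kv.1 == ele then 1 else 0))))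
    (out.items, out.getD ele 0)
  else
    let out := PySem.Dict.mk d.items   -- 'out = dict(lst)'
    if inc then ((out.insert ele 0).items, 0) else (out.items, 0)

-- ===== PRECONDITION & SPEC =====
-- Pre_ excludes only association lists with duplicate keys: they do not represent any Python
-- dict, so no input of the Python function is excluded (A's argument 'lst' is a dict).
def Pre_incCounter (lst : List (String × Int)) (ele : String) (inc : Bool) : Prop :=
  (lst.map Prod.fst).Nodup
instance (lst : List (String × Int)) (ele : String) (inc : Bool) : Decidable (Pre_incCounter lst ele inc) := by unfold Pre_incCounter; infer_instance
def pvWitness_incCounter : (List (String × Int)) × String × Bool := ([("a", 3), ("b", -1)], "a", true)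

def Spec_incCounter (lst : List (String × Int)) (ele : String) (inc : Bool) (out : (List (String × Int)) × Int) : Prop := out = incCounter_alt lst ele inc
instance (lst : List (String × Int)) (ele : String) (inc : Bool) (out : (List (String × Int)) × Int) : Decidable (Spec_incCounter lst ele inc out) := by unfold Spec_incCounter; infer_instance

-- ===== CLAIM (what is proved, stated in full; the proofs are below) =====
def Claim_equal_incCounter : Prop := ∀ (lst : List (String × Int)) (ele : String) (inc : Bool), Dom_incCounter lst ele inc → Pre_incCounter lst ele inc → Spec_incCounter lst ele inc (incCounter lst ele inc)

-- ===== LEMMAS AND PROOFS =====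

-- A's loop over l returns the found branch iff ele is among l's keys, otherwise the fall-through branch.
theorem incCounterGo_eq (lst : List (String × Int)) (ele : String) (inc : Bool) :
    ∀ l : List (String × Int),
      incCounterGo lst ele inc l =
        if l.any (fun p => p.1 == ele) then
          let d := if inc then (PySem.Dict.mk lst).modify ele 0 (· + 1) else PySem.Dict.mk lst
          (d.items, d.getD ele 0)
        else if inc then (((PySem.Dict.mk lst).insert ele 0).items, 0) else (lst, 0)
  | [] => by simp [incCounterGo]
  | (key, val) :: rest => by
      by_cases h : key = ele
      · subst h; simp [incCounterGo]
      · have hb : (key == ele) = false := by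
          cases hk : key == ele
          · rfl
          · exact absurd (eq_of_beq hk) h
        rw [incCounterGo, hb]
        simp only [Bool.false_eq_true, if_false]
        rw [incCounterGo_eq lst ele inc rest]
        have hc : (((key, val) :: rest).any fun p => p.1 == ele) = (rest.any fun p => p.1 == ele) := by
          rw [List.any_cons, hb, Bool.false_or]
        rw [hc]

theorem get?_mk_isSome_iff_any (ele : String) :
    ∀ l : List (String × Int), ((PySem.Dict.mk l).get? ele).isSome = l.any (fun p => p.1 == ele)
  | [] => by simp [PySem.Dict.get?]
  | (k, v) :: rest => by
      rw [PySem.Dict.get?_mk_cons]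
      by_cases h : k = ele
      · simp [h]
      · simp [h, get?_mk_isSome_iff_any ele rest]

-- every entry of a duplicate-free association list carries the dict's value for its key
theorem snd_eq_getD_of_mem (lst : List (String × Int)) (hnd : (lst.map Prod.fst).Nodup)
    {p : String × Int} (hp : p ∈ lst) : (PySem.Dict.mk lst).getD p.1 0 = p.2 := by
  have : (p.1, p.2) ∈ (PySem.Dict.mk lst).items := by simpa using hp
  exact PySem.Dict.getD_of_mem_items _ this (by simpa [PySem.Dict.keys] using hnd) 0

-- ===== VERDICT (by name: the statement is the Claim_ definition above) =====
theorem incCounter_spec : Claim_equal_incCounter := by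
  intro lst ele inc _ hnd
  show incCounter lst ele inc = incCounter_alt lst ele inc
  rw [incCounter, incCounterGo_eq, ← get?_mk_isSome_iff_any]
  have hkeys : (PySem.Dict.mk lst).keys.Nodup := by simpa [PySem.Dict.keys] using hnd
  rcases hg : (PySem.Dict.mk lst).get? ele with _ | w
  · -- not found: both fall through to the same insert / unchanged return
    have hc : (PySem.Dict.mk lst).contains ele = false := by
      rw [PySem.Dict.contains_eq_isSome_get?, hg]; rfl
    simp [incCounter_alt, hc]
  · have hc : (PySem.Dict.mk lst).contains ele = true := by
      rw [PySem.Dict.contains_eq_isSome_get?, hg]; rfl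
    have hmem : (ele, w) ∈ lst := by
      simpa using (PySem.Dict.get?_eq_some_iff_mem_items _ ele w hkeys).mp hg
    have hgetD : (PySem.Dict.mk lst).getD ele 0 = w := by
      rw [PySem.Dict.getD_eq_get?_getD, hg]; rfl
    simp only [Option.isSome_some, if_true, incCounter_alt, hc]
    cases inc
    · -- inc = false: the comprehension adds 0 to every value, so it rebuilds lst itself
      have hmap : lst.map (fun kv : String × Int =>
          (kv.1, kv.2 + (0 : Int) * (if (kv.1 == ele) = true then 1 else 0))) = lst := by
        simp
      simp [hgetD]
    · -- inc = true: modify-at-ele and the bumping comprehension produce the same items list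
      have hmod : (PySem.Dict.mk lst).modify ele 0 (· + 1)
          = (PySem.Dict.mk lst).insert ele (w + 1) := by
        rw [PySem.Dict.modify, hgetD]
      have hitems : ((PySem.Dict.mk lst).insert ele (w + 1)).items
          = lst.map (fun kv : String × Int =>
              (kv.1, kv.2 + (1 : Int) * (if (kv.1 == ele) = true then 1 else 0))) := by
        rw [PySem.Dict.items_insert_of_contains _ _ hc]
        refine List.map_congr_left (fun p hp => ?_)
        by_cases h : p.1 = ele
        · have hb : (p.1 == ele) = true := by exact beq_iff_eq.mpr h
          have hv : p.2 = w := by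
            have := snd_eq_getD_of_mem lst hnd hp
            rw [h, hgetD] at this; omega
          simp [h, hv]
        · have hb : (p.1 == ele) = false := by
            cases hk : p.1 == ele
            · rfl
            · exact absurd (eq_of_beq hk) h
          simp [hb]
      have hout : (PySem.Dict.mk (lst.map (fun kv : String × Int =>
          (kv.1, kv.2 + (1 : Int) * (if (kv.1 == ele) = true then 1 else 0))))).getD ele 0
          = w + 1 := by
        rw [← hitems]
        exact PySem.Dict.getD_insert_self _ _ _ 0
      simp only [if_true]
      rw [hmod]
      refine Prod.ext ?_ ?_
      · simpa using hitems
      · show (({ items := lst } : PySem.Dict String Int).insert ele (w + 1)).getD ele 0 = _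
        rw [PySem.Dict.getD_insert_self]
        exact hout.symm
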